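-- pv_equiv track=rewrite | github.com/shimtaehun/pysou2 | algorithm/test1.py | maxFunc
-- ===== SOURCE A (Python) =====
-- def maxFunc(a, n):
--     if n == 1:
--         return a[0]
--     max_of_rest = maxFunc(a, n - 1)
--     if a[n - 1] > max_of_rest:
--         return a[n - 1]
--     else:
--         return max_of_rest
-- ===== SOURCE B (Python) =====
-- def maxFunc(a, n):
--     best = a[0]
--     for i in range(1, n):
--         if a[i] > best:
--             best = a[i]
--     return best
-- ===== Notes on version B (the rewrite author's own statement) =====
-- stated objective: faster
-- what changed: Replaces the deep recursion (one Python frame per element, RecursionError past ~1000) with a single iterative scan keeping a running best.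
import Mathlib
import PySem

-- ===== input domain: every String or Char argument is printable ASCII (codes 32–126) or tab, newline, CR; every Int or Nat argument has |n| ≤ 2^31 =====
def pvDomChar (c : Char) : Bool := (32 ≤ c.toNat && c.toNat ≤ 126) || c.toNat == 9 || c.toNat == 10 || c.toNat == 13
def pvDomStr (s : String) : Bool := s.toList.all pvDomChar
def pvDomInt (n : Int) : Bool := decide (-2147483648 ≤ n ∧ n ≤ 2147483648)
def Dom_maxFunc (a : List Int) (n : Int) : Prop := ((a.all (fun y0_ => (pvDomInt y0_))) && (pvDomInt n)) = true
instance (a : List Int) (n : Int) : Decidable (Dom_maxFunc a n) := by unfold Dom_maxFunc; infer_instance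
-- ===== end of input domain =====

-- B replaces A's per-element recursion (deep call stack) by a single iterative scan with a running best.
-- ===== PORT A =====
def maxFunc (a : List Int) (n : Int) : Int :=
  if n = 1 then (PySem.List.pyGet? a 0).getD 0
  else if _h : n ≤ 1 then 0   -- Python recurses without end here (n ≤ 0); excluded by Pre_
  else
    let max_of_rest := maxFunc a (n - 1)
    if (PySem.List.pyGet? a (n - 1)).getD 0 > max_of_rest then (PySem.List.pyGet? a (n - 1)).getD 0
    else max_of_rest
termination_by n.toNat
decreasing_by omega

-- ===== PORT B =====
def maxFunc_alt (a : List Int) (n : Int) : Int :=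
  (PySem.List.pyRange 1 n 1).foldl
    (fun best i => if (PySem.List.pyGet? a i).getD 0 > best then (PySem.List.pyGet? a i).getD 0 else best)
    ((PySem.List.pyGet? a 0).getD 0)

-- ===== PRECONDITION & SPEC =====
-- Pre_ excludes n ≤ 0 (A recurses forever: RecursionError) and n > len(a) (A raises IndexError).
def Pre_maxFunc (a : List Int) (n : Int) : Prop := 1 ≤ n ∧ n ≤ a.length
instance (a : List Int) (n : Int) : Decidable (Pre_maxFunc a n) := by unfold Pre_maxFunc; infer_instance
def pvWitness_maxFunc : List Int × Int := ([3, -1, 7, 7], 3)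
def Spec_maxFunc (a : List Int) (n : Int) (out : Int) : Prop := out = maxFunc_alt a n
instance (a : List Int) (n : Int) (out : Int) : Decidable (Spec_maxFunc a n out) := by unfold Spec_maxFunc; infer_instance

-- ===== CLAIM (what is proved, stated in full; the proofs are below) =====
def Claim_equal_maxFunc : Prop := ∀ (a : List Int) (n : Int), Dom_maxFunc a n → Pre_maxFunc a n → Spec_maxFunc a n (maxFunc a n)

-- ===== LEMMAS AND PROOFS =====
-- The two ports agree for every n ≥ 1, whatever the list: induction on n - 1.
theorem maxFunc_eq_alt_of_pos (a : List Int) (k : Nat) :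
    maxFunc a (1 + k) = maxFunc_alt a (1 + k) := by
  induction k with
  | zero =>
    simp [maxFunc, maxFunc_alt]
  | succ m ih =>
    have hsplit : PySem.List.pyRange 1 (1 + (m + 1 : Nat)) 1
        = PySem.List.pyRange 1 (1 + (m : Nat)) 1 ++ [(1 + (m : Nat) : Int)] := by
      have : (1 + ((m : Int) + 1)) = (1 + (m : Int)) + 1 := by ring
      push_cast
      rw [this, PySem.List.pyRange_one_succ_right (by omega)]
    unfold maxFunc_alt
    rw [hsplit, List.foldl_append]
    unfold maxFunc_alt at ih
    rw [maxFunc]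
    have h1 : ¬ ((1 : Int) + ((m : Nat) + 1 : Nat) = 1) := by push_cast; omega
    have h2 : ¬ ((1 : Int) + ((m : Nat) + 1 : Nat) ≤ 1) := by push_cast; omega
    rw [if_neg h1, dif_neg h2]
    have h3 : (1 : Int) + ((m : Nat) + 1 : Nat) - 1 = 1 + (m : Nat) := by push_cast; ring
    rw [h3, ← ih]
    simp [List.foldl]

-- ===== VERDICT (by name: the statement is the Claim_ definition above) =====
theorem maxFunc_spec : Claim_equal_maxFunc := by
  intro a n _ hpre
  unfold Spec_maxFunc
  obtain ⟨h1, _⟩ := hpre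
  obtain ⟨k, hk⟩ : ∃ k : Nat, n = 1 + (k : Int) := ⟨(n - 1).toNat, by omega⟩
  rw [hk]
  exact maxFunc_eq_alt_of_pos a k
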